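-- pv_equiv track=rewrite | github.com/taabich/cldr-deployment | roles/cluster/cdh/filter_plugins/host_templates.py | count_service_role
-- ===== SOURCE A (Python) =====
-- def count_service_role(host_templates, hostvars, service_name, role_name):
--     # Count how many hosts per template
--     template_counts = {}
--     for host, vars in hostvars.items():
--         tpl = vars.get('host_template')
--         if tpl:
--             template_counts[tpl] = template_counts.get(tpl, 0) + 1
--
--     count = 0
--     for tpl_name, services in host_templates.items():
--
--         for service, roles in services.items():
--             if service.lower() != service_name.lower():
--                 continue
--             for role in roles:
--                 if role.lower() == role_name.lower():
--                     count = count + template_counts.get(tpl_name, 0)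
--
--     return count
-- ===== SOURCE B (Python) =====
-- def count_service_role(host_templates, hostvars, service_name, role_name):
--     s = service_name.lower()
--     r = role_name.lower()
--     total = 0
--     for tpl_name, services in host_templates.items():
--         # matching (service, role) occurrences for this template
--         m = 0
--         for service, roles in services.items():
--             if service.lower() == s:
--                 for role in roles:
--                     if role.lower() == r:
--                         m += 1
--         if m:
--             # each host assigned to this template contributes m
--             for host, hvars in hostvars.items():
--                 tpl = hvars.get('host_template')
--                 if tpl and tpl == tpl_name:
--                     total += m
--     return total
-- ===== Notes on version B (the rewrite author's own statement) =====
-- stated objective: alternative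
-- what changed: B removes A's template_counts dict entirely: it computes the match count m per template with service_name.lower()/role_name.lower() hoisted out of the loops and, only when m is nonzero, rescans hostvars inline adding m per host assigned to that template, instead of A's pre-tabulated host counter looked up inside a triple loop that re-lowercases the query strings on every inner iteration.
import Mathlib
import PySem

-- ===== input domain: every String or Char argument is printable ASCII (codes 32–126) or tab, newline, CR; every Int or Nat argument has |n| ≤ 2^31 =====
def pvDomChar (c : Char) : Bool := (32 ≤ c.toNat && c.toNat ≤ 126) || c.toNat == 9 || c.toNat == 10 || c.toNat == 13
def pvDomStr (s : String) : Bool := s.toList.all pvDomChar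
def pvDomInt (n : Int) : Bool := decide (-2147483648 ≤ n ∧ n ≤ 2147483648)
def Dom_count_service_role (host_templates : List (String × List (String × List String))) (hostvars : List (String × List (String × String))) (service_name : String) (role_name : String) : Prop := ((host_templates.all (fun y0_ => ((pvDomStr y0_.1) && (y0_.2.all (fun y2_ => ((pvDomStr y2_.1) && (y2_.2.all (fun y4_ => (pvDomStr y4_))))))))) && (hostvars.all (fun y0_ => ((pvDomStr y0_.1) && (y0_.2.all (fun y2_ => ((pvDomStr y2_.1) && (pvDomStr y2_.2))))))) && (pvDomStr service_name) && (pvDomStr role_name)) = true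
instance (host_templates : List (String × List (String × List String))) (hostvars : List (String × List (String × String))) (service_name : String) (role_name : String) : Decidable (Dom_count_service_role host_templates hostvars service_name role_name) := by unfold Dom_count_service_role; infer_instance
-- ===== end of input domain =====

-- B drops A's template_counts dict entirely: it computes each template's match count m and, when m ≠ 0, rescans the hosts inline; objective: alternative.

-- ===== PORT A =====
-- template_counts: hosts per template (truthy host_template only)
def csrTC (hostvars : List (String × List (String × String))) : PySem.Dict String Int :=
  hostvars.foldl (fun tc hp =>
    match hp.2.lookup "host_template" with
    | some tpl => if tpl = "" then tc else tc.insert tpl (tc.getD tpl 0 + 1)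
    | none => tc) PySem.Dict.empty

def count_service_role (host_templates : List (String × List (String × List String))) (hostvars : List (String × List (String × String))) (service_name : String) (role_name : String) : Int :=
  let tc := csrTC hostvars
  host_templates.foldl (fun count tp =>
    tp.2.foldl (fun count sp =>
      if PySem.Str.lower sp.1 ≠ PySem.Str.lower service_name then count
      else sp.2.foldl (fun count role =>
        if PySem.Str.lower role == PySem.Str.lower role_name then count + tc.getD tp.1 0
        else count) count) count) 0

-- ===== PORT B =====
def count_service_role_alt (host_templates : List (String × List (String × List String))) (hostvars : List (String × List (String × String))) (service_name : String) (role_name : String) : Int :=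
  let s := PySem.Str.lower service_name
  let r := PySem.Str.lower role_name
  host_templates.foldl (fun total tp =>
    let m : Int := tp.2.foldl (fun m sp =>
      if PySem.Str.lower sp.1 == s then
        sp.2.foldl (fun m role => if PySem.Str.lower role == r then m + 1 else m) m
      else m) 0
    if m ≠ 0 then
      hostvars.foldl (fun total hp =>
        match hp.2.lookup "host_template" with
        | some tpl => if tpl ≠ "" ∧ tpl = tp.1 then total + m else total
        | none => total) total
    else total) 0

-- ===== PRECONDITION & SPEC =====
def Spec_count_service_role (host_templates : List (String × List (String × List String))) (hostvars : List (String × List (String × String))) (service_name : String) (role_name : String) (out : Int) : Prop := out = count_service_role_alt host_templates hostvars service_name role_name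
instance (host_templates : List (String × List (String × List String))) (hostvars : List (String × List (String × String))) (service_name : String) (role_name : String) (out : Int) : Decidable (Spec_count_service_role host_templates hostvars service_name role_name out) := by unfold Spec_count_service_role; infer_instance

-- ===== CLAIM (what is proved, stated in full; the proofs are below) =====
def Claim_equal_count_service_role : Prop := ∀ (host_templates : List (String × List (String × List String))) (hostvars : List (String × List (String × String))) (service_name : String) (role_name : String), Dom_count_service_role host_templates hostvars service_name role_name → Spec_count_service_role host_templates hostvars service_name role_name (count_service_role host_templates hostvars service_name role_name)

-- ===== LEMMAS AND PROOFS =====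

-- match count of one template's services, in closed form
def csrM (s r : String) (services : List (String × List String)) : Int :=
  (((services.filter (fun sp => PySem.Str.lower sp.1 == s)).flatMap (·.2)).countP
    (fun role => PySem.Str.lower role == r) : Int)

-- number of hosts assigned (with a truthy host_template) to template t
def csrHC (hv : List (String × List (String × String))) (t : String) : Int :=
  (hv.map (fun hp =>
    match hp.2.lookup "host_template" with
    | some tpl => if tpl ≠ "" ∧ tpl = t then (1:Int) else 0
    | none => 0)).sum

-- a role loop adding c per match
theorem csr_role_loop (roles : List String) (p : String → Bool) (c acc : Int) :
    roles.foldl (fun a role => if p role then a + c else a) acc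
      = acc + (roles.countP p : Int) * c := by
  induction roles generalizing acc with
  | nil => simp
  | cons x xs ih =>
      simp only [List.foldl_cons, List.countP_cons]
      by_cases h : p x = true
      · simp [h, ih]; ring
      · simp [h, ih]

-- A's service loop for one entry adds csrM * c
theorem csr_entry_loop (services : List (String × List String)) (sn rn : String) (c acc : Int) :
    services.foldl (fun count sp =>
      if PySem.Str.lower sp.1 ≠ PySem.Str.lower sn then count
      else sp.2.foldl (fun count role =>
        if PySem.Str.lower role == PySem.Str.lower rn then count + c else count) count) acc
    = acc + csrM (PySem.Str.lower sn) (PySem.Str.lower rn) services * c := by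
  induction services generalizing acc with
  | nil => simp [csrM]
  | cons sp rest ih =>
      simp only [List.foldl_cons]
      by_cases h : PySem.Str.lower sp.1 = PySem.Str.lower sn
      · simp only [h, ne_eq, not_true_eq_false, if_false, ih,
          csr_role_loop sp.2 (fun role => PySem.Str.lower role == PySem.Str.lower rn) c acc]
        simp [csrM, h]
        ring
      · simp only [ne_eq, h, not_false_eq_true, if_true, ih]
        simp [csrM, h]

-- A as a sum over template entries
theorem csr_A_sum (ht : List (String × List (String × List String))) (tc : PySem.Dict String Int)
    (sn rn : String) (acc : Int) :
    ht.foldl (fun count tp =>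
      tp.2.foldl (fun count sp =>
        if PySem.Str.lower sp.1 ≠ PySem.Str.lower sn then count
        else sp.2.foldl (fun count role =>
          if PySem.Str.lower role == PySem.Str.lower rn then count + tc.getD tp.1 0
          else count) count) count) acc
    = acc + (ht.map (fun e => csrM (PySem.Str.lower sn) (PySem.Str.lower rn) e.2 * tc.getD e.1 0)).sum := by
  induction ht generalizing acc with
  | nil => simp
  | cons e rest ih =>
      simp only [List.foldl_cons, List.map_cons, List.sum_cons,
        csr_entry_loop e.2 sn rn (tc.getD e.1 0) acc, ih]
      ring

-- template_counts value characterisation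
theorem csr_tc_getD (hv : List (String × List (String × String))) (d : PySem.Dict String Int) (t : String) :
    (hv.foldl (fun tc hp =>
      match hp.2.lookup "host_template" with
      | some tpl => if tpl = "" then tc else tc.insert tpl (tc.getD tpl 0 + 1)
      | none => tc) d).getD t 0
    = d.getD t 0 + csrHC hv t := by
  induction hv generalizing d with
  | nil => simp [csrHC]
  | cons hp rest ih =>
      simp only [List.foldl_cons, csrHC, List.map_cons, List.sum_cons]
      cases h : hp.2.lookup "host_template" with
      | none => rw [ih]; simp [csrHC]
      | some tpl =>
          by_cases h1 : tpl = ""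
          · simp only [h1]; rw [ih]; simp [csrHC]
          · simp only [if_neg h1]
            rw [ih, PySem.Dict.getD_insert]
            by_cases h2 : t = tpl
            · subst h2; simp [h1, csrHC]; ring
            · have h3 : ¬ (tpl = t) := fun h => h2 h.symm
              simp [h2, h1, h3, csrHC]

-- B's inner m loop computes csrM
theorem csr_m_eq (services : List (String × List String)) (s r : String) (acc : Int) :
    services.foldl (fun m sp =>
      if PySem.Str.lower sp.1 == s then
        sp.2.foldl (fun m role => if PySem.Str.lower role == r then m + 1 else m) m
      else m) acc
    = acc + csrM s r services := by
  induction services generalizing acc with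
  | nil => simp [csrM]
  | cons sp rest ih =>
      simp only [List.foldl_cons]
      by_cases h : PySem.Str.lower sp.1 = s
      · rw [if_pos (by simp [h]),
          csr_role_loop sp.2 (fun role => PySem.Str.lower role == r) 1 acc, ih]
        simp [csrM, h]; ring
      · rw [if_neg (by simp [h]), ih]
        simp [csrM, h]

-- B's host rescan adds csrHC * m
theorem csr_hostscan (hv : List (String × List (String × String))) (t : String) (m acc : Int) :
    hv.foldl (fun total hp =>
      match hp.2.lookup "host_template" with
      | some tpl => if tpl ≠ "" ∧ tpl = t then total + m else total
      | none => total) acc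
    = acc + csrHC hv t * m := by
  induction hv generalizing acc with
  | nil => simp [csrHC]
  | cons hp rest ih =>
      simp only [List.foldl_cons, csrHC, List.map_cons, List.sum_cons]
      cases h : hp.2.lookup "host_template" with
      | none => rw [ih]; simp [csrHC]
      | some tpl =>
          by_cases h1 : tpl ≠ "" ∧ tpl = t
          · simp only [if_pos h1, ih]; simp [csrHC]; ring
          · simp only [if_neg h1, ih]; simp [csrHC]

-- B as a sum over template entries
theorem csr_B_sum (ht : List (String × List (String × List String)))
    (hv : List (String × List (String × String))) (s r : String) (acc : Int) :
    ht.foldl (fun total tp =>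
      let m : Int := tp.2.foldl (fun m sp =>
        if PySem.Str.lower sp.1 == s then
          sp.2.foldl (fun m role => if PySem.Str.lower role == r then m + 1 else m) m
        else m) 0
      if m ≠ 0 then
        hv.foldl (fun total hp =>
          match hp.2.lookup "host_template" with
          | some tpl => if tpl ≠ "" ∧ tpl = tp.1 then total + m else total
          | none => total) total
      else total) acc
    = acc + (ht.map (fun e => csrM s r e.2 * csrHC hv e.1)).sum := by
  induction ht generalizing acc with
  | nil => simp
  | cons e rest ih =>
      simp only [List.foldl_cons, List.map_cons, List.sum_cons]
      rw [csr_m_eq e.2 s r 0]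
      simp only [zero_add]
      by_cases h : csrM s r e.2 = 0
      · rw [if_neg (by simp [h]), ih, h]; ring
      · rw [if_pos (by simp [h]), csr_hostscan hv e.1 (csrM s r e.2) acc, ih]; ring

-- ===== VERDICT (by name: the statement is the Claim_ definition above) =====
theorem count_service_role_spec : Claim_equal_count_service_role := by
  intro ht hv sn rn _
  unfold Spec_count_service_role count_service_role count_service_role_alt csrTC
  rw [csr_A_sum, csr_B_sum]
  simp only [zero_add]
  refine congrArg List.sum (List.map_congr_left (fun e _ => ?_))
  rw [csr_tc_getD hv PySem.Dict.empty e.1]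
  simp [PySem.Dict.getD_empty]
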